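-- pv_equiv track=rewrite | github.com/LegitStack/maestro | transition.py | direct_path
-- ===== SOURCE A (Python) =====
-- import itertools
--
-- def direct_path(start, finish):
--     # 0 = |..| = 0111 (corresponding indices are already accurate).
--     n = len(start)
--     lst = [list(i) for i in itertools.product([0, 1], repeat=n)]
--     indices = []
--     for i, rep in enumerate(lst):
--         keep_count = 0
--         for ix, item in enumerate(rep):
--             if item == 0 and start[ix] == finish[ix]:
--                 keep_count += 1
--             elif item == 1 and start[ix] != finish[ix]:
--                 keep_count += 1
--         if keep_count == len(rep):
--             indices.append(i)
--     return indices
-- ===== SOURCE B (Python) =====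
-- def direct_path(start, finish):
--     # Build the matching product index directly: bit = 1 where start differs
--     # from finish, MSB first; exactly one bitmask matches, so return it alone.
--     acc = 0
--     for s, f in zip(start, finish):
--         acc = 2 * acc + (1 if s != f else 0)
--     return [acc]
-- ===== Notes on version B (the rewrite author's own statement) =====
-- stated objective: faster
-- what changed: Instead of enumerating all 2^n bitmasks and testing each position, B computes the unique matching index directly as the binary number whose bits (MSB first) mark positions where start differs from finish.
import Mathlib
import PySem

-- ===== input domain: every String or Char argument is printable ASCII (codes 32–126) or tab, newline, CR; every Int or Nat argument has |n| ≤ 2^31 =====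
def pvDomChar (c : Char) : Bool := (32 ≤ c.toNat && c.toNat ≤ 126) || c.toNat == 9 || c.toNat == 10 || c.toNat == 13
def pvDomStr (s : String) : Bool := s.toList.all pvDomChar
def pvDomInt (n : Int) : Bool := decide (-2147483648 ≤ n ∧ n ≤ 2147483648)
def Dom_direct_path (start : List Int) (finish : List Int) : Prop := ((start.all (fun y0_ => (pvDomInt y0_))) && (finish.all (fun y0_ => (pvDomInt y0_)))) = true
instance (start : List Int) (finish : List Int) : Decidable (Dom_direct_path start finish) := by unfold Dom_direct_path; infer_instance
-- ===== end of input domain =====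

-- B replaces A's enumeration of all 2^n bitmasks by directly building the unique
-- matching index from the difference bits (MSB first); objective: faster.


-- ===== PORT A =====
-- itertools.product([0, 1], repeat=n), each tuple as a list
def prodBits : Nat → List (List Int)
  | 0 => [[]]
  | n + 1 => ([0, 1] : List Int).flatMap (fun b => (prodBits n).map (b :: ·))

def direct_path (start : List Int) (finish : List Int) : List Int :=
  let n := start.length
  let lst := prodBits n
  (PySem.List.enumerate lst 0).foldl
    (fun indices p =>
      let keep : Int := (PySem.List.enumerate p.2 0).foldl
        (fun k q =>
          if q.2 = 0 ∧ (PySem.List.pyGet? start q.1).getD 0 = (PySem.List.pyGet? finish q.1).getD 0 then k + 1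
          else if q.2 = 1 ∧ (PySem.List.pyGet? start q.1).getD 0 ≠ (PySem.List.pyGet? finish q.1).getD 0 then k + 1
          else k) 0
      if keep = (p.2.length : Int) then indices ++ [p.1] else indices)
    []

-- ===== PORT B =====
def direct_path_alt (start : List Int) (finish : List Int) : List Int :=
  [(start.zip finish).foldl (fun acc p => 2 * acc + (if p.1 ≠ p.2 then 1 else 0)) 0]

-- ===== PRECONDITION & SPEC =====
-- Pre_ excludes exactly the inputs where Python A raises IndexError: finish shorter than start.
def Pre_direct_path (start : List Int) (finish : List Int) : Prop := start.length ≤ finish.length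
instance (start : List Int) (finish : List Int) : Decidable (Pre_direct_path start finish) := by unfold Pre_direct_path; infer_instance

def pvWitness_direct_path : List Int × List Int := ([1, 2, 3], [1, 5, 3])

def Spec_direct_path (start : List Int) (finish : List Int) (out : List Int) : Prop := out = direct_path_alt start finish
instance (start : List Int) (finish : List Int) (out : List Int) : Decidable (Spec_direct_path start finish out) := by unfold Spec_direct_path; infer_instance

-- ===== CLAIM (what is proved, stated in full; the proofs are below) =====
def Claim_equal_direct_path : Prop := ∀ (start : List Int) (finish : List Int), Dom_direct_path start finish → Pre_direct_path start finish → Spec_direct_path start finish (direct_path start finish)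

-- ===== LEMMAS AND PROOFS =====

-- the difference bitmask: 1 where start differs from finish, 0 where equal
def pvMask (start finish : List Int) : List Int :=
  (start.zip finish).map (fun p => if p.1 = p.2 then 0 else 1)

-- value of a bit list read MSB first, with starting accumulator a
def pvVal (a : Int) (m : List Int) : Int := m.foldl (fun acc b => 2 * acc + b) a

theorem pvVal_shift (m : List Int) (a : Int) : pvVal a m = a * 2 ^ m.length + pvVal 0 m := by
  induction m generalizing a with
  | nil => simp [pvVal]
  | cons b t ih =>
    simp only [pvVal, List.foldl_cons, List.length_cons]
    rw [show (List.foldl (fun acc b => 2 * acc + b) (2 * a + b) t : Int) = pvVal (2 * a + b) t from rfl,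
        show (List.foldl (fun acc b => 2 * acc + b) (2 * 0 + b) t : Int) = pvVal (2 * 0 + b) t from rfl,
        ih (2 * a + b), ih (2 * 0 + b)]
    ring

theorem length_prodBits (n : Nat) : (prodBits n).length = 2 ^ n := by
  induction n with
  | zero => rfl
  | succ k ih => simp [prodBits, List.flatMap_cons, ih, pow_succ]; ring

theorem mem_prodBits {n : Nat} {rep : List Int} (h : rep ∈ prodBits n) :
    rep.length = n ∧ ∀ x ∈ rep, x = 0 ∨ x = 1 := by
  induction n generalizing rep with
  | zero => simp [prodBits] at h; simp [h]
  | succ k ih =>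
    simp only [prodBits, List.flatMap_cons, List.flatMap_nil, List.append_nil, List.mem_append,
      List.mem_map] at h
    rcases h with ⟨t, ht, rfl⟩ | ⟨t, ht, rfl⟩ <;> obtain ⟨hl, hb⟩ := ih ht
    · refine ⟨by simp [hl], fun x hx => ?_⟩
      rcases List.mem_cons.mp hx with h | hx'
      · left; exact h
      · exact hb x hx'
    · refine ⟨by simp [hl], fun x hx => ?_⟩
      rcases List.mem_cons.mp hx with h | hx'
      · right; exact h
      · exact hb x hx'

theorem enumerate_map {α β : Type} (f : α → β) (l : List α) (s : Int) :
    PySem.List.enumerate (l.map f) s = (PySem.List.enumerate l s).map (fun p => (p.1, f p.2)) := by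
  induction l generalizing s with
  | nil => simp [PySem.List.enumerate_nil]
  | cons x t ih => simp [PySem.List.enumerate_cons, ih]

-- the filtered enumeration of prodBits n keeps exactly the index pvVal 0 m
theorem filter_enumerate_prodBits (n : Nat) (m : List Int) (s : Int)
    (hlen : m.length = n) (hbit : ∀ x ∈ m, x = 0 ∨ x = 1) :
    ((PySem.List.enumerate (prodBits n) s).filter (fun p => decide (p.2 = m))).map (·.1)
      = [s + pvVal 0 m] := by
  induction n generalizing m s with
  | zero =>
    rw [List.length_eq_zero_iff.mp hlen]
    simp [prodBits, PySem.List.enumerate_cons, PySem.List.enumerate_nil, pvVal]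
  | succ k ih =>
    cases m with
    | nil => simp at hlen
    | cons b t =>
      have hlt : t.length = k := by simpa using hlen
      have hbt : ∀ x ∈ t, x = 0 ∨ x = 1 := fun x hx => hbit x (List.mem_cons_of_mem _ hx)
      have hprod : prodBits (k + 1) = (prodBits k).map (0 :: ·) ++ (prodBits k).map (1 :: ·) := by
        simp [prodBits, List.flatMap_cons]
      rw [hprod, PySem.List.enumerate_append, List.filter_append, List.map_append,
        enumerate_map, enumerate_map, List.filter_map, List.filter_map,
        List.length_map, length_prodBits]
      rcases hbit b (List.mem_cons_self) with rfl | rfl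
      · have h1 : (PySem.List.enumerate (prodBits k) s).filter
            ((fun p => decide (p.2 = (0 : Int) :: t)) ∘ (fun p => (p.1, (0 : Int) :: p.2)))
            = (PySem.List.enumerate (prodBits k) s).filter (fun p => decide (p.2 = t)) := by
          apply List.filter_congr; intro p _; simp
        have h2 : (PySem.List.enumerate (prodBits k) (s + (2 ^ k : Nat))).filter
            ((fun p => decide (p.2 = (0 : Int) :: t)) ∘ (fun p => (p.1, (1 : Int) :: p.2))) = [] := by
          apply List.filter_eq_nil_iff.mpr; intro p _; simp
        rw [h1, h2]
        simp only [List.map_nil, List.append_nil, List.map_map]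
        have := ih t s hlt hbt
        rw [show ((fun p : Int × List Int => p.1) ∘ fun p : Int × List Int => (p.1, (0 : Int) :: p.2))
            = (fun p : Int × List Int => p.1) from rfl, this]
        simp [pvVal]
      · have h1 : (PySem.List.enumerate (prodBits k) s).filter
            ((fun p => decide (p.2 = (1 : Int) :: t)) ∘ (fun p => (p.1, (0 : Int) :: p.2))) = [] := by
          apply List.filter_eq_nil_iff.mpr; intro p _; simp
        have h2 : (PySem.List.enumerate (prodBits k) (s + (2 ^ k : Nat))).filter
            ((fun p => decide (p.2 = (1 : Int) :: t)) ∘ (fun p => (p.1, (1 : Int) :: p.2)))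
            = (PySem.List.enumerate (prodBits k) (s + (2 ^ k : Nat))).filter (fun p => decide (p.2 = t)) := by
          apply List.filter_congr; intro p _; simp
        rw [h1, h2]
        simp only [List.map_nil, List.nil_append, List.map_map]
        have := ih t (s + (2 ^ k : Nat)) hlt hbt
        rw [show ((fun p : Int × List Int => p.1) ∘ fun p : Int × List Int => (p.1, (1 : Int) :: p.2))
            = (fun p : Int × List Int => p.1) from rfl, this]
        have hv : pvVal 0 ((1 : Int) :: t) = 2 ^ k + pvVal 0 t := by
          simp only [pvVal, List.foldl_cons]
          rw [show (List.foldl (fun acc b => 2 * acc + b) (2 * 0 + 1) t : Int) = pvVal (2 * 0 + 1) t from rfl,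
            pvVal_shift, hlt]
          show (2 * 0 + 1) * 2 ^ k + pvVal 0 t = 2 ^ k + pvVal 0 t
          ring
        rw [hv]
        have hc : s + ((2 ^ k : Nat) : Int) + pvVal 0 t = s + (2 ^ k + pvVal 0 t) := by
          push_cast; ring
        rw [hc]

theorem pyGet?_some {l : List Int} {k : Nat} (hk : k < l.length) :
    PySem.List.pyGet? l (k : Int) = some l[k] := by
  rw [PySem.List.pyGet?_natCast]
  exact List.getElem?_eq_getElem hk

-- the inner keep-count equals the length iff rep is exactly the difference mask
theorem keep_iff_mask (start finish rep : List Int) (hpre : start.length ≤ finish.length)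
    (hlen : rep.length = start.length) (hbit : ∀ x ∈ rep, x = 0 ∨ x = 1) :
    ((PySem.List.enumerate rep 0).foldl
        (fun k q =>
          if q.2 = 0 ∧ (PySem.List.pyGet? start q.1).getD 0 = (PySem.List.pyGet? finish q.1).getD 0 then k + 1
          else if q.2 = 1 ∧ (PySem.List.pyGet? start q.1).getD 0 ≠ (PySem.List.pyGet? finish q.1).getD 0 then k + 1
          else k) (0 : Int) = (rep.length : Int))
      ↔ rep = pvMask start finish := by
  have hstep : ∀ (k : Int) (q : Int × Int), (if q.2 = 0 ∧ (PySem.List.pyGet? start q.1).getD 0 = (PySem.List.pyGet? finish q.1).getD 0 then k + 1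
          else if q.2 = 1 ∧ (PySem.List.pyGet? start q.1).getD 0 ≠ (PySem.List.pyGet? finish q.1).getD 0 then k + 1
          else k)
      = (if (q.2 = 0 ∧ (PySem.List.pyGet? start q.1).getD 0 = (PySem.List.pyGet? finish q.1).getD 0)
          ∨ (q.2 = 1 ∧ (PySem.List.pyGet? start q.1).getD 0 ≠ (PySem.List.pyGet? finish q.1).getD 0) then k + 1 else k) := by
    intro k q
    by_cases h1 : q.2 = 0 ∧ (PySem.List.pyGet? start q.1).getD 0 = (PySem.List.pyGet? finish q.1).getD 0
    · simp [h1]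
    · by_cases h2 : q.2 = 1 ∧ (PySem.List.pyGet? start q.1).getD 0 ≠ (PySem.List.pyGet? finish q.1).getD 0
      · simp [h2]
      · simp [h2]
  rw [PySem.List.foldl_congr_mem (PySem.List.enumerate rep) _
      (fun k q => if (q.2 = 0 ∧ (PySem.List.pyGet? start q.1).getD 0 = (PySem.List.pyGet? finish q.1).getD 0)
          ∨ (q.2 = 1 ∧ (PySem.List.pyGet? start q.1).getD 0 ≠ (PySem.List.pyGet? finish q.1).getD 0) then k + 1 else k)
      0 (fun acc x _ => hstep acc x), PySem.List.foldl_ite_add_one]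
  have hmlen : (pvMask start finish).length = start.length := by
    simp [pvMask, List.length_zip]; omega
  constructor
  · intro h
    have hcount : (PySem.List.enumerate rep 0).countP
        (fun q => decide ((q.2 = 0 ∧ (PySem.List.pyGet? start q.1).getD 0 = (PySem.List.pyGet? finish q.1).getD 0)
          ∨ (q.2 = 1 ∧ (PySem.List.pyGet? start q.1).getD 0 ≠ (PySem.List.pyGet? finish q.1).getD 0)))
        = (PySem.List.enumerate rep 0).length := by
      have := PySem.List.length_enumerate (xs := rep) (s := 0)
      omega
    have hall := List.countP_eq_length.mp hcount
    apply List.ext_getElem (by omega)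
    intro i hi hi2
    have hq : ((0 : Int) + (i : Int), rep[i]) ∈ PySem.List.enumerate rep 0 :=
      (PySem.List.mem_enumerate_iff _ _ _).mpr ⟨i, hi, rfl⟩
    have := hall _ hq
    simp only [zero_add, decide_eq_true_eq] at this
    have his : i < start.length := by omega
    have hif : i < finish.length := by omega
    rw [pyGet?_some his, pyGet?_some hif] at this
    simp only [Option.getD_some] at this
    have hm : (pvMask start finish)[i] = if start[i] = finish[i] then (0 : Int) else 1 := by
      simp [pvMask, List.getElem_zip]
    rw [hm]
    rcases this with ⟨h0, heq⟩ | ⟨h1, hne⟩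
    · simp [h0, heq]
    · simp [h1, if_neg hne]
  · rintro rfl
    have hall : ∀ q ∈ PySem.List.enumerate (pvMask start finish) 0,
          (decide ((q.2 = 0 ∧ (PySem.List.pyGet? start q.1).getD 0 = (PySem.List.pyGet? finish q.1).getD 0)
            ∨ (q.2 = 1 ∧ (PySem.List.pyGet? start q.1).getD 0 ≠ (PySem.List.pyGet? finish q.1).getD 0))) = true := by
        intro q hq
        obtain ⟨i, hi, rfl⟩ := (PySem.List.mem_enumerate_iff _ _ _).mp hq
        have his : i < start.length := by omega
        have hif : i < finish.length := by omega
        simp only [zero_add, decide_eq_true_eq]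
        rw [pyGet?_some his, pyGet?_some hif]
        simp only [Option.getD_some]
        have : (pvMask start finish)[i] = if start[i] = finish[i] then (0 : Int) else 1 := by
          simp [pvMask, List.getElem_zip]
        rw [this]
        by_cases h : start[i] = finish[i]
        · left; simp [h]
        · right; simp [h]
    rw [List.countP_eq_length.mpr hall, PySem.List.length_enumerate]
    omega

theorem pvVal_mask (start finish : List Int) :
    pvVal 0 (pvMask start finish)
      = (start.zip finish).foldl (fun acc p => 2 * acc + (if p.1 ≠ p.2 then 1 else 0)) 0 := by
  rw [pvVal, pvMask, List.foldl_map]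
  apply PySem.List.foldl_congr_mem
  intro acc p _
  by_cases h : p.1 = p.2 <;> simp [h]

-- ===== VERDICT (by name: the statement is the Claim_ definition above) =====
theorem direct_path_spec : Claim_equal_direct_path := by
  intro start finish _ hpre
  have hpre : start.length ≤ finish.length := hpre
  unfold Spec_direct_path direct_path direct_path_alt
  simp only []
  have hmask_len : (pvMask start finish).length = start.length := by
    simp [pvMask, List.length_zip]; omega
  have hmask_bit : ∀ x ∈ pvMask start finish, x = 0 ∨ x = 1 := by
    intro x hx
    simp only [pvMask, List.mem_map] at hx
    obtain ⟨p, _, rfl⟩ := hx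
    by_cases h : p.1 = p.2 <;> simp [h]
  have hcongr : (PySem.List.enumerate (prodBits start.length) 0).foldl
      (fun indices p =>
        let keep : Int := (PySem.List.enumerate p.2 0).foldl
          (fun k q =>
            if q.2 = 0 ∧ (PySem.List.pyGet? start q.1).getD 0 = (PySem.List.pyGet? finish q.1).getD 0 then k + 1
            else if q.2 = 1 ∧ (PySem.List.pyGet? start q.1).getD 0 ≠ (PySem.List.pyGet? finish q.1).getD 0 then k + 1
            else k) 0
        if keep = (p.2.length : Int) then indices ++ [p.1] else indices) []
      = (PySem.List.enumerate (prodBits start.length) 0).foldl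
        (fun indices p => if p.2 = pvMask start finish then indices ++ [p.1] else indices) [] := by
    apply PySem.List.foldl_congr_mem
    intro acc p hp
    obtain ⟨i, hi, rfl⟩ := (PySem.List.mem_enumerate_iff _ _ _).mp hp
    obtain ⟨hl, hb⟩ := mem_prodBits (List.getElem_mem hi)
    simp only []
    rw [if_congr (keep_iff_mask start finish _ hpre hl hb) rfl rfl]
  rw [hcongr, PySem.List.foldl_append_ite (p := fun p : Int × List Int => p.2 = pvMask start finish) (f := fun p : Int × List Int => p.1),
    List.nil_append,
    filter_enumerate_prodBits start.length (pvMask start finish) 0 hmask_len hmask_bit,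
    pvVal_mask]
  simp
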